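-- pv_equiv track=rewrite | github.com/AlgoLab/pangeblocks | src/utils_smk.py | split_vec_by_consecutive_values
-- ===== SOURCE A (Python) =====
-- def split_vec_by_consecutive_values(vec):
--     """split a vector (start:end) by consecutive values"""
--     splits=[]
--     curr_pos = 0
--     start = 0
--     end   = 0
--
--     while curr_pos < len(vec)-1:
--
--         if vec[curr_pos] == vec[curr_pos+1]:
--             end = curr_pos + 1
--         else:
--             splits.append((start,end))
--             start = end + 1
--             end = start
--
--         # move one position
--         curr_pos +=1
--
--     # append last consecutive (positions) of values
--     splits.append((start, end))
--
--     return splits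
-- ===== SOURCE B (Python) =====
-- def split_vec_by_consecutive_values(vec):
--     """split a vector (start:end) by consecutive values"""
--     if not vec:
--         return []
--     cuts = [0] + [i for i in range(1, len(vec)) if vec[i] != vec[i - 1]] + [len(vec)]
--     return [(cuts[k], cuts[k + 1] - 1) for k in range(len(cuts) - 1)]
-- ===== Notes on version B (the rewrite author's own statement) =====
-- stated objective: alternative
-- what changed: B computes the list of run-boundary cut positions (indices where vec[i] != vec[i-1]) and then maps adjacent cuts to (start,end) pairs, instead of A's single while-loop with inline start/end/append bookkeeping; on the empty list B returns [] instead of A's spurious [(0,0)].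
-- intended difference: On the empty list A returns [(0,0)], a spurious interval over indices the input does not have (an accident of its start/end initialisation); B returns [], the intended empty split. — e.g. on split_vec_by_consecutive_values([]): A returns [(0, 0)], B returns []
import Mathlib
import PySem

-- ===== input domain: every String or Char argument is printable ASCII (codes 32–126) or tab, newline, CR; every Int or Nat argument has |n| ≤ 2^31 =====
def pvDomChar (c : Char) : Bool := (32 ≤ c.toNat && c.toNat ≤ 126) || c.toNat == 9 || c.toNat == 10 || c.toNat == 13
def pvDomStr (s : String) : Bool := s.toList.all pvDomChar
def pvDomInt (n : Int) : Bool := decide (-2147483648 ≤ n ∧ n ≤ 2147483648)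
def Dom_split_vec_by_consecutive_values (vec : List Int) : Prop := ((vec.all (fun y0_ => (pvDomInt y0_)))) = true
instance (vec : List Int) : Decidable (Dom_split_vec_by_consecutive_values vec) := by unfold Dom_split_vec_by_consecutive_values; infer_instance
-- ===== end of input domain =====

-- B rebuilds the result as cut positions (run boundaries) then maps adjacent cuts to (start,end) pairs —
-- a build-cuts-then-map decomposition instead of A's inline start/end bookkeeping; on the empty list B
-- returns [] where A returns the spurious interval [(0,0)] (see D_ below).

-- ===== PORT A =====
def split_vec_by_consecutive_values (vec : List Int) : List (Int × Int) :=
  -- while curr_pos < len(vec)-1 with state (splits, start, end); curr_pos is the loop index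
  let st := (PySem.List.pyRange 0 ((vec.length : Int) - 1) 1).foldl
    (fun (s : List (Int × Int) × Int × Int) curr_pos =>
      let splits := s.1; let start := s.2.1; let e := s.2.2
      if PySem.List.pyGetD vec curr_pos 0 == PySem.List.pyGetD vec (curr_pos + 1) 0 then
        (splits, start, curr_pos + 1)
      else
        (splits ++ [(start, e)], e + 1, e + 1))
    ([], 0, 0)
  st.1 ++ [(st.2.1, st.2.2)]

-- ===== PORT B =====
def split_vec_by_consecutive_values_alt (vec : List Int) : List (Int × Int) :=
  if vec = [] then []
  else
    let n : Int := vec.length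
    let cuts : List Int :=
      [0] ++ (PySem.List.pyRange 1 n 1).filter
        (fun i => !(PySem.List.pyGetD vec i 0 == PySem.List.pyGetD vec (i - 1) 0)) ++ [n]
    (PySem.List.pyRange 0 ((cuts.length : Int) - 1) 1).map
      (fun k => (PySem.List.pyGetD cuts k 0, PySem.List.pyGetD cuts (k + 1) 0 - 1))

-- ===== PRECONDITION & SPEC =====
-- On the empty list A returns [(0,0)], a spurious interval over indices the input does not have
-- (an accident of its start/end initialisation); B returns [], the intended empty split.
def D_split_vec_by_consecutive_values (vec : List Int) : Prop := vec = []
instance (vec : List Int) : Decidable (D_split_vec_by_consecutive_values vec) := by unfold D_split_vec_by_consecutive_values; infer_instance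
def Spec_split_vec_by_consecutive_values (vec : List Int) (out : List (Int × Int)) : Prop := ¬ D_split_vec_by_consecutive_values vec → out = split_vec_by_consecutive_values_alt vec
instance (vec : List Int) (out : List (Int × Int)) : Decidable (Spec_split_vec_by_consecutive_values vec out) := by unfold Spec_split_vec_by_consecutive_values; infer_instance
def pvDiffWitness_split_vec_by_consecutive_values : List Int := []
def pvDiffWitnessOut_split_vec_by_consecutive_values : (List (Int × Int)) × (List (Int × Int)) := ([(0, 0)], [])

-- ===== CLAIM (what is proved, stated in full; the proofs are below) =====
def Claim_unchanged_split_vec_by_consecutive_values : Prop := ∀ (vec : List Int), Dom_split_vec_by_consecutive_values vec → Spec_split_vec_by_consecutive_values vec (split_vec_by_consecutive_values vec)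
def Claim_changed_split_vec_by_consecutive_values : Prop := Dom_split_vec_by_consecutive_values (pvDiffWitness_split_vec_by_consecutive_values) ∧ D_split_vec_by_consecutive_values (pvDiffWitness_split_vec_by_consecutive_values) ∧ split_vec_by_consecutive_values (pvDiffWitness_split_vec_by_consecutive_values) = pvDiffWitnessOut_split_vec_by_consecutive_values.1 ∧ split_vec_by_consecutive_values_alt (pvDiffWitness_split_vec_by_consecutive_values) = pvDiffWitnessOut_split_vec_by_consecutive_values.2 ∧ pvDiffWitnessOut_split_vec_by_consecutive_values.1 ≠ pvDiffWitnessOut_split_vec_by_consecutive_values.2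
def Claim_exact_split_vec_by_consecutive_values : Prop := ∀ (vec : List Int), Dom_split_vec_by_consecutive_values vec → D_split_vec_by_consecutive_values vec → split_vec_by_consecutive_values vec ≠ split_vec_by_consecutive_values_alt vec

-- ===== LEMMAS AND PROOFS =====

-- reference recursion: process indices i, i+1, … comparing vec[i] with vec[i+1]; fuel = (len-1) - i
def runsF (vec : List Int) (start : Int) (i : Nat) : Nat → List (Int × Int)
  | 0 => [(start, (i : Int))]
  | fuel + 1 =>
      if vec[i]?.getD 0 = vec[i + 1]?.getD 0 then
        runsF vec start (i + 1) fuel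
      else
        (start, (i : Int)) :: runsF vec ((i : Int) + 1) (i + 1) fuel

-- interval list generated by a cut list, final cut nn
def pairsOf (nn : Int) (start : Int) : List Int → List (Int × Int)
  | [] => [(start, nn - 1)]
  | c :: cs => (start, c - 1) :: pairsOf nn c cs

theorem loopA_eq_runsF (vec : List Int) :
    ∀ (fuel i : Nat) (start : Int) (splits : List (Int × Int)),
      (let st := (PySem.List.pyRange (i : Int) ((i : Int) + (fuel : Int)) 1).foldl
        (fun (s : List (Int × Int) × Int × Int) curr_pos =>
          if PySem.List.pyGetD vec curr_pos 0 == PySem.List.pyGetD vec (curr_pos + 1) 0 then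
            (s.1, s.2.1, curr_pos + 1)
          else
            (s.1 ++ [(s.2.1, s.2.2)], s.2.2 + 1, s.2.2 + 1))
        (splits, start, (i : Int))
       st.1 ++ [(st.2.1, st.2.2)]) = splits ++ runsF vec start i fuel := by
  intro fuel
  induction fuel with
  | zero =>
      intro i start splits
      simp [PySem.List.pyRange_one_eq_nil, runsF]
  | succ fuel ih =>
      intro i start splits
      rw [PySem.List.pyRange_one_cons (by push_cast; omega)]
      simp only [List.foldl_cons]
      by_cases h : PySem.List.pyGetD vec (i : Int) 0 = PySem.List.pyGetD vec ((i : Int) + 1) 0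
      · have hb : (PySem.List.pyGetD vec (i : Int) 0 == PySem.List.pyGetD vec ((i : Int) + 1) 0) = true := by
          simpa using h
        simp only [hb, if_true]
        have := ih (i + 1) start splits
        rw [runsF]
        have hc : ((i : Int) + 1) = ((i + 1 : Nat) : Int) := by push_cast; ring
        rw [hc] at h
        simp only [PySem.List.pyGetD_natCast, List.getD_eq_getElem?_getD] at h
        rw [if_pos h]
        simpa [Nat.cast_add, Nat.cast_one, add_assoc, add_comm, add_left_comm] using this
      · have hb : (PySem.List.pyGetD vec (i : Int) 0 == PySem.List.pyGetD vec ((i : Int) + 1) 0) = false := by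
          simpa using h
        simp only [hb, Bool.false_eq_true, if_false]
        have := ih (i + 1) ((i : Int) + 1) (splits ++ [(start, (i : Int))])
        rw [runsF]
        have hc : ((i : Int) + 1) = ((i + 1 : Nat) : Int) := by push_cast; ring
        rw [hc] at h
        simp only [PySem.List.pyGetD_natCast, List.getD_eq_getElem?_getD] at h
        rw [if_neg h]
        simpa [Nat.cast_add, Nat.cast_one, add_assoc, add_comm, add_left_comm] using this

theorem runsF_eq_pairsOf (vec : List Int) :
    ∀ (fuel i : Nat) (start : Int), i + fuel + 1 = vec.length →
      runsF vec start i fuel =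
        pairsOf (vec.length : Int) start
          ((PySem.List.pyRange ((i : Int) + 1) (vec.length : Int) 1).filter
            (fun j => !(PySem.List.pyGetD vec j 0 == PySem.List.pyGetD vec (j - 1) 0))) := by
  intro fuel
  induction fuel with
  | zero =>
      intro i start hlen
      have : ((i : Int) + 1) = (vec.length : Int) := by omega
      rw [this, PySem.List.pyRange_one_eq_nil le_rfl]
      simp only [List.filter_nil, runsF, pairsOf]
      have : ((i : Int)) = (vec.length : Int) - 1 := by omega
      rw [this]
  | succ fuel ih =>
      intro i start hlen
      rw [PySem.List.pyRange_one_cons (by omega)]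
      rw [List.filter_cons]
      have hsimp : ((i : Int) + 1 - 1) = (i : Int) := by ring
      by_cases h : vec[i + 1]?.getD 0 = vec[i]?.getD 0
      · have hb : (!(PySem.List.pyGetD vec ((i : Int) + 1) 0 == PySem.List.pyGetD vec ((i : Int) + 1 - 1) 0)) = false := by
          have hc : ((i : Int) + 1) = ((i + 1 : Nat) : Int) := by push_cast; ring
          rw [hsimp, hc]
          simp only [PySem.List.pyGetD_natCast, List.getD_eq_getElem?_getD, h]
          simp
        rw [hb]
        simp only [Bool.false_eq_true, if_false]
        rw [runsF, if_pos h.symm]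
        have := ih (i + 1) start (by omega)
        rw [this]
        norm_num [add_assoc]
      · have hb : (!(PySem.List.pyGetD vec ((i : Int) + 1) 0 == PySem.List.pyGetD vec ((i : Int) + 1 - 1) 0)) = true := by
          have hc : ((i : Int) + 1) = ((i + 1 : Nat) : Int) := by push_cast; ring
          rw [hsimp, hc]
          simp only [PySem.List.pyGetD_natCast, List.getD_eq_getElem?_getD]
          simp [h]
        rw [hb]
        simp only [if_true]
        rw [runsF, if_neg (fun hh => h hh.symm)]
        simp only [pairsOf]
        have := ih (i + 1) ((i : Int) + 1) (by omega)
        rw [this]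
        norm_num [add_assoc]

theorem map_cuts_eq_pairsOf (nn : Int) :
    ∀ (cs : List Int) (s : Int),
      (List.range (cs.length + 1)).map
        (fun k => ((s :: (cs ++ [nn])).getD k 0, (s :: (cs ++ [nn])).getD (k + 1) 0 - 1)) =
      pairsOf nn s cs := by
  intro cs
  induction cs with
  | nil => intro s; simp [pairsOf, List.range_succ]
  | cons c cs ih =>
      intro s
      rw [List.length_cons, List.range_succ_eq_map]
      simp only [List.map_cons, List.map_map]
      simp only [pairsOf]
      congr 1
      have := ih c
      rw [← this]
      apply List.map_congr_left
      intro k _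
      simp [Function.comp]

-- ===== VERDICT (by name: the statement is the Claim_ definition above) =====
theorem split_vec_by_consecutive_values_spec : Claim_unchanged_split_vec_by_consecutive_values := by
  intro vec _ hne
  have hne' : vec ≠ [] := hne
  have hlen : 1 ≤ vec.length := List.length_pos_iff.mpr hne'
  -- abbreviations
  set interior := (PySem.List.pyRange 1 (vec.length : Int) 1).filter
      (fun i => !(PySem.List.pyGetD vec i 0 == PySem.List.pyGetD vec (i - 1) 0)) with hint
  -- A's side equals runsF
  have hA : split_vec_by_consecutive_values vec = [] ++ runsF vec 0 0 (vec.length - 1) := by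
    have h0 : ((vec.length : Int) - 1) = ((0 : Nat) : Int) + ((vec.length - 1 : Nat) : Int) := by
      push_cast; omega
    unfold split_vec_by_consecutive_values
    rw [h0]
    exact loopA_eq_runsF vec (vec.length - 1) 0 0 []
  -- runsF equals pairsOf of the interior cuts
  have hR := runsF_eq_pairsOf vec (vec.length - 1) 0 0 (by omega)
  simp only [Nat.cast_zero, zero_add] at hR
  -- B's side equals the same pairsOf
  have hB : split_vec_by_consecutive_values_alt vec = pairsOf (vec.length : Int) 0 interior := by
    unfold split_vec_by_consecutive_values_alt
    rw [if_neg hne']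
    show (PySem.List.pyRange 0 (((([(0 : Int)] ++ interior ++ [(vec.length : Int)]).length : Nat) : Int) - 1) 1).map
        (fun k => (PySem.List.pyGetD ([(0 : Int)] ++ interior ++ [(vec.length : Int)]) k 0,
                   PySem.List.pyGetD ([(0 : Int)] ++ interior ++ [(vec.length : Int)]) (k + 1) 0 - 1))
      = pairsOf (vec.length : Int) 0 interior
    have hlen2 : ((([(0 : Int)] ++ interior ++ [(vec.length : Int)]).length : Nat) : Int) - 1
        = ((interior.length + 1 : Nat) : Int) := by
      simp
    rw [hlen2, PySem.List.pyRange_zero_nat, List.map_map]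
    have hmap := map_cuts_eq_pairsOf (vec.length : Int) interior 0
    rw [← hmap]
    apply List.map_congr_left
    intro k hk
    have hc : ((k : Int) + 1) = ((k + 1 : Nat) : Int) := by push_cast; ring
    simp only [Function.comp, hc, PySem.List.pyGetD_natCast]
    rfl
  rw [hA, List.nil_append, hR, hB]

theorem split_vec_by_consecutive_values_changed : Claim_changed_split_vec_by_consecutive_values := by
  unfold Claim_changed_split_vec_by_consecutive_values; decide

theorem split_vec_by_consecutive_values_tight : Claim_exact_split_vec_by_consecutive_values := by
  intro vec _ hd
  subst hd
  decide
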